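-- pv_equiv track=rewrite | github.com/ArielHL/CrawlerWeb | src/WC_4/Spiders/spider.py | sort_links
-- ===== SOURCE A (Python) =====
-- def sort_links(keywords:list[str],
--                target_list:list[str]) -> None:
--
--     def key_func(url_list):
--         for keyword in keywords:
--             if keyword in url_list:
--                 return keyword
--         return ''
--
--     return sorted(target_list, key=key_func,reverse=True)
-- ===== SOURCE B (Python) =====
-- def sort_links(keywords, target_list):
--     # group urls into insertion-ordered buckets keyed by their first matching keyword
--     buckets = {}
--     for url in target_list:
--         key = ''
--         for keyword in keywords:
--             if keyword in url:
--                 key = keyword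
--                 break
--         buckets.setdefault(key, []).append(url)
--     out = []
--     for k in sorted(buckets, reverse=True):
--         out.extend(buckets[k])
--     return out
-- ===== Notes on version B (the rewrite author's own statement) =====
-- stated objective: alternative
-- what changed: Replaces the keyed stable reverse sort of all URLs with one grouping pass into insertion-ordered dict buckets keyed by each URL's first matching keyword, then sorts only the distinct keys descending and concatenates the buckets; it trades the comparison sort of n URLs for a hash-grouping pass plus a sort of the distinct keys.
import Mathlib
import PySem

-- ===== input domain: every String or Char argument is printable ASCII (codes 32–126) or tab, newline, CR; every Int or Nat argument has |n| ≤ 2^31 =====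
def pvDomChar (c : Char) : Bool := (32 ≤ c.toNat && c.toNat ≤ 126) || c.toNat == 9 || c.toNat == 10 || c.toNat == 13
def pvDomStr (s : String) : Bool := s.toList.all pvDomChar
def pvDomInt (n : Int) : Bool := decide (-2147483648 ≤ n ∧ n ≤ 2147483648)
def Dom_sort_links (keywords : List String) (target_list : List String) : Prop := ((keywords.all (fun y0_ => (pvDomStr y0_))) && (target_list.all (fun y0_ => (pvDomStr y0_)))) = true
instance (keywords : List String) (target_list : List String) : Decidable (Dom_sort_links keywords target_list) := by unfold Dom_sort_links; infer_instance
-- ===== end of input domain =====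

-- B groups URLs into insertion-ordered dict buckets by first matching keyword and then sorts
-- only the distinct keys descending and concatenates the buckets, instead of A's keyed stable
-- reverse sort of all URLs (objective: alternative algorithm, same measured cost).


-- ===== PORT A =====
-- A's inner key_func: the first keyword that is a substring of the url, else ''.
-- (B's Python contains the same keyword loop, written with a flag and break; one helper serves both ports.)
def keyFunc (keywords : List String) (url : String) : String :=
  match keywords with
  | [] => ""
  | kw :: rest => if PySem.Str.isIn kw url then kw else keyFunc rest url

def sort_links (keywords : List String) (target_list : List String) : List String :=
  PySem.List.sorted target_list (keyFunc keywords) true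

-- ===== PORT B =====
def sort_links_alt (keywords : List String) (target_list : List String) : List String :=
  let buckets : PySem.Dict String (List String) :=
    target_list.foldl
      (fun d url => d.modify (keyFunc keywords url) [] (fun l => l ++ [url]))
      PySem.Dict.empty
  let ks := PySem.List.sorted buckets.keys (fun k => k) true
  ks.foldl (fun out k => out ++ buckets.getD k []) []

-- ===== PRECONDITION & SPEC =====
def Spec_sort_links (keywords : List String) (target_list : List String) (out : List String) : Prop := out = sort_links_alt keywords target_list
instance (keywords : List String) (target_list : List String) (out : List String) : Decidable (Spec_sort_links keywords target_list out) := by unfold Spec_sort_links; infer_instance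

-- ===== CLAIM (what is proved, stated in full; the proofs are below) =====
def Claim_equal_sort_links : Prop := ∀ (keywords : List String) (target_list : List String), Dom_sort_links keywords target_list → Spec_sort_links keywords target_list (sort_links keywords target_list)

-- ===== LEMMAS AND PROOFS =====

-- The grouped shape of the dict B builds: one entry per distinct key (first-seen order),
-- holding the urls carrying that key, in their original order.
def grouped (f : String → String) (xs : List String) : List (String × List String) :=
  (PySem.List.dedup (xs.map f)).map (fun k => (k, xs.filter (fun u => f u == k)))

lemma dedup_snoc {α : Type} [BEq α] [LawfulBEq α] (l : List α) (a : α) :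
    PySem.List.dedup (l ++ [a]) =
      if a ∈ PySem.List.dedup l then PySem.List.dedup l else PySem.List.dedup l ++ [a] := by
  simp only [PySem.List.dedup, PySem.Set.ofList, List.foldl_append, List.foldl_cons, List.foldl_nil,
    PySem.Set.add]
  split <;> split <;> simp_all [PySem.Set.contains]



lemma find?_keyed (h : String → List String) (ds : List String) (k : String) (hk : k ∈ ds) :
    List.find? (fun p => p.1 == k) (ds.map (fun k' => (k', h k'))) = some (k, h k) := by
  induction ds with
  | nil => cases hk
  | cons d t ih =>
      by_cases hd : d = k
      · subst hd; simp
      · have hbk : (d == k) = false := by simp [hd]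
        have hk' : k ∈ t := by
          rcases List.mem_cons.1 hk with h1|h1
          · exact absurd h1.symm hd
          · exact h1
        simp only [List.map_cons, List.find?_cons, hbk]
        exact ih hk'

lemma contains_grouped (f : String → String) (xs : List String) (k : String) :
    (PySem.Dict.mk (grouped f xs)).contains k = decide (k ∈ xs.map f) := by
  simp only [PySem.Dict.contains, grouped, List.any_map]
  by_cases hk : k ∈ xs.map f
  · have : k ∈ PySem.List.dedup (xs.map f) := (PySem.List.mem_dedup _ _).2 hk
    simp only [hk, decide_true, List.any_eq_true]
    exact ⟨k, this, by simp⟩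
  · have hnd : k ∉ PySem.List.dedup (xs.map f) := fun h => hk ((PySem.List.mem_dedup _ _).1 h)
    simp only [hk, decide_false, List.any_eq_false]
    intro a ha
    simp only [Function.comp]
    intro e
    exact hnd (beq_iff_eq.1 e ▸ ha)

lemma getD_grouped (f : String → String) (xs : List String) (k : String) (hk : k ∈ xs.map f) :
    (PySem.Dict.mk (grouped f xs)).getD k [] = xs.filter (fun u => f u == k) := by
  have : k ∈ PySem.List.dedup (xs.map f) := (PySem.List.mem_dedup _ _).2 hk
  rw [PySem.Dict.getD, PySem.Dict.get?, grouped, find?_keyed (fun k => xs.filter (fun u => f u == k)) _ _ this]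
  rfl

lemma getD_grouped_absent (f : String → String) (xs : List String) (k : String)
    (hk : k ∉ xs.map f) :
    (PySem.Dict.mk (grouped f xs)).getD k [] = [] := by
  have hnd : k ∉ PySem.List.dedup (xs.map f) := fun h => hk ((PySem.List.mem_dedup _ _).1 h)
  rw [PySem.Dict.getD, PySem.Dict.get?, grouped]
  rw [List.find?_eq_none.2 (by
    intro p hp
    simp only [List.mem_map] at hp
    rcases hp with ⟨k', hk', rfl⟩
    simp only [beq_iff_eq]
    exact fun e => hnd (e ▸ hk'))]
  rfl

lemma grouped_snoc (f : String → String) (xs : List String) (x : String) :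
    PySem.Dict.mk (grouped f (xs ++ [x]))
      = (PySem.Dict.mk (grouped f xs)).modify (f x) [] (fun l => l ++ [x]) := by
  rw [PySem.Dict.modify, PySem.Dict.insert]
  by_cases hx : f x ∈ xs.map f
  · rw [contains_grouped]
    simp only [hx, decide_true, if_true, getD_grouped f xs (f x) hx]
    have hds : PySem.List.dedup ((xs ++ [x]).map f) = PySem.List.dedup (xs.map f) := by
      rw [List.map_append, List.map_singleton, dedup_snoc,
        if_pos ((PySem.List.mem_dedup _ _).2 hx)]
    congr 1
    rw [grouped, hds, grouped, List.map_map]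
    refine List.map_congr_left ?_
    intro k hk
    by_cases hkx : k = f x
    · subst hkx
      simp [List.filter_append]
    · have hb : (k == f x) = false := by simp [hkx]
      simp only [Function.comp, hb]
      rw [List.filter_append]
      simp [Ne.symm hkx]
  · rw [contains_grouped]
    simp only [hx, decide_false, Bool.false_eq_true, if_false,
      getD_grouped_absent f xs (f x) hx]
    have hds : PySem.List.dedup ((xs ++ [x]).map f) = PySem.List.dedup (xs.map f) ++ [f x] := by
      rw [List.map_append, List.map_singleton, dedup_snoc,
        if_neg (fun h => hx ((PySem.List.mem_dedup _ _).1 h))]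
    congr 1
    rw [grouped, hds, List.map_append, grouped]
    congr 1
    · refine List.map_congr_left ?_
      intro k hk
      have hkm : k ∈ xs.map f := (PySem.List.mem_dedup _ _).1 hk
      have : (f x == k) = false := by
        simp only [beq_eq_false_iff_ne, ne_eq]
        exact fun e => hx (e ▸ hkm)
      rw [List.filter_append]
      simp [this]
    · have : xs.filter (fun u => f u == f x) = [] := by
        rw [List.filter_eq_nil_iff]
        intro u hu
        simp only [beq_iff_eq]
        exact fun e => hx (e ▸ List.mem_map_of_mem hu)
      simp [List.filter_append, this]

lemma build_eq_grouped (f : String → String) (xs : List String) :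
    xs.foldl (fun d url => d.modify (f url) [] (fun l => l ++ [url])) PySem.Dict.empty
      = PySem.Dict.mk (grouped f xs) := by
  induction xs using List.reverseRecOn with
  | nil => rfl
  | append_singleton ys x ih =>
      rw [List.foldl_append, List.foldl_cons, List.foldl_nil, ih, grouped_snoc]

lemma insertBy_skip {α : Type} (before : α → α → Bool) (x : α) (as bs : List α)
    (h : ∀ a ∈ as, before x a = false) :
    PySem.List.insertBy before x (as ++ bs) = as ++ PySem.List.insertBy before x bs := by
  induction as with
  | nil => simp
  | cons a t ih =>
      have ha : before x a = false := h a (by simp)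
      simp only [List.cons_append, PySem.List.insertBy, ha, Bool.false_eq_true, if_false]
      exact congrArg (a :: ·) (ih (fun b hb => h b (by simp [hb])))

lemma insertBy_front {α : Type} (before : α → α → Bool) (x : α) (bs : List α)
    (h : ∀ b ∈ bs, before x b = true) :
    PySem.List.insertBy before x bs = x :: bs := by
  cases bs with
  | nil => rfl
  | cons b t => simp [PySem.List.insertBy, h b (by simp)]

lemma insertBy_bucket (f : String → String) (x : String) (xs : List String)
    (ks : List String) (hks : ks.Pairwise (fun a b => b < a)) (hx : f x ∈ ks) :
    PySem.List.insertBy (fun a b => decide (f b < f a)) x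
        (ks.flatMap (fun k => xs.filter (fun u => f u == k)))
      = ks.flatMap (fun k => (xs ++ [x]).filter (fun u => f u == k)) := by
  induction ks with
  | nil => cases hx
  | cons k t ih =>
      have hlt : ∀ k' ∈ t, k' < k := fun k' h' => (List.pairwise_cons.1 hks).1 k' h'
      have htp : t.Pairwise (fun a b => b < a) := (List.pairwise_cons.1 hks).2
      simp only [List.flatMap_cons]
      by_cases hkx : f x = k
      · -- x belongs to the first bucket
        have h1 : ∀ a ∈ xs.filter (fun u => f u == k), (decide (f a < f x)) = false := by
          intro a ha
          have : f a = k := by simpa using (List.mem_filter.1 ha).2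
          simp [this, hkx]
        rw [insertBy_skip _ _ _ _ h1]
        have h2 : ∀ b ∈ t.flatMap (fun k' => xs.filter (fun u => f u == k')),
            (decide (f b < f x)) = true := by
          intro b hb
          rcases List.mem_flatMap.1 hb with ⟨k', hk', hbk⟩
          have : f b = k' := by simpa using (List.mem_filter.1 hbk).2
          simp [this, hkx, hlt k' hk']
        rw [insertBy_front _ _ _ h2]
        have h3 : (xs ++ [x]).filter (fun u => f u == k) = xs.filter (fun u => f u == k) ++ [x] := by
          rw [List.filter_append]; simp [hkx]
        have h4 : t.flatMap (fun k' => (xs ++ [x]).filter (fun u => f u == k'))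
            = t.flatMap (fun k' => xs.filter (fun u => f u == k')) := by
          refine List.flatMap_congr ?_
          intro k' hk'
          rw [List.filter_append]
          have : (f x == k') = false := by
            simp only [beq_eq_false_iff_ne, ne_eq]
            exact fun e => absurd (e ▸ hlt k' hk') (by simp [hkx])
          simp [this]
        rw [h3, h4]
        simp
      · -- x belongs to a later bucket
        have hxt : f x ∈ t := by
          rcases List.mem_cons.1 hx with h1|h1
          · exact absurd h1 hkx
          · exact h1
        have h1 : ∀ a ∈ xs.filter (fun u => f u == k), (decide (f a < f x)) = false := by
          intro a ha
          have hfa : f a = k := by simpa using (List.mem_filter.1 ha).2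
          simp only [hfa, decide_eq_false_iff_not]
          exact lt_asymm (hlt _ hxt)
        rw [insertBy_skip _ _ _ _ h1, ih htp hxt]
        have : (xs ++ [x]).filter (fun u => f u == k) = xs.filter (fun u => f u == k) := by
          rw [List.filter_append]
          simp [hkx]
        rw [this]

lemma sorted_rev_eq_flatMap (f : String → String) (xs : List String)
    (ks : List String) (hks : ks.Pairwise (fun a b => b < a))
    (hmem : ∀ u ∈ xs, f u ∈ ks) :
    PySem.List.sorted xs f true = ks.flatMap (fun k => xs.filter (fun u => f u == k)) := by
  induction xs using List.reverseRecOn with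
  | nil => simp [PySem.List.sorted]
  | append_singleton ys x ih =>
      rw [PySem.List.sorted_rev_eq_foldl_insertBy, List.foldl_append, List.foldl_cons,
        List.foldl_nil, ← PySem.List.sorted_rev_eq_foldl_insertBy,
        ih (fun u hu => hmem u (by simp [hu]))]
      exact insertBy_bucket f x ys ks hks (hmem x (by simp))

theorem main (keywords target_list : List String) :
    sort_links keywords target_list = sort_links_alt keywords target_list := by
  have hkeys : (PySem.Dict.mk (grouped (keyFunc keywords) target_list)).keys
      = PySem.List.dedup (target_list.map (keyFunc keywords)) := by
    rw [PySem.Dict.keys, grouped, List.map_map]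
    exact List.map_id _
  have halt : sort_links_alt keywords target_list
      = (PySem.List.sorted (PySem.List.dedup (target_list.map (keyFunc keywords))) (fun k => k) true).foldl
          (fun out k => out ++ (PySem.Dict.mk (grouped (keyFunc keywords) target_list)).getD k []) [] := by
    rw [sort_links_alt]
    rw [build_eq_grouped (keyFunc keywords) target_list, hkeys]
  have h1 := PySem.List.sorted_pairwise_rev
      (PySem.List.dedup (target_list.map (keyFunc keywords))) (fun k => k)
  have h2 : (PySem.List.sorted (PySem.List.dedup (target_list.map (keyFunc keywords)))
      (fun k => k) true).Nodup :=
    (PySem.List.sorted_perm _ (fun k => k) true).nodup_iff.2 (PySem.List.nodup_dedup _)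
  have hgt := (h1.and h2).imp (fun h => lt_of_le_of_ne h.1 (Ne.symm h.2))
  have hmem : ∀ u ∈ target_list, keyFunc keywords u ∈
      PySem.List.sorted (PySem.List.dedup (target_list.map (keyFunc keywords))) (fun k => k) true := by
    intro u hu
    rw [PySem.List.mem_sorted, PySem.List.mem_dedup]
    exact List.mem_map_of_mem hu
  rw [sort_links, halt, PySem.List.foldl_append_eq_flatMap, List.nil_append]
  rw [List.flatMap_congr (fun k hk => getD_grouped (keyFunc keywords) target_list k
    (by rw [← PySem.List.mem_dedup]; rw [PySem.List.mem_sorted] at hk; exact hk))]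
  exact sorted_rev_eq_flatMap (keyFunc keywords) target_list _ hgt hmem

-- ===== VERDICT (by name: the statement is the Claim_ definition above) =====
theorem sort_links_spec : Claim_equal_sort_links := by
  intro keywords target_list _
  exact main keywords target_list
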